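-- pv_equiv track=rewrite | github.com/martindo/agent-orchestrator | studio/studio/graph/validator.py | _can_reach_terminal
-- ===== SOURCE A (Python) =====
-- from collections import deque
--
-- def _can_reach_terminal(
--     phase_id: str,
--     adj: dict[str, list[str]],
--     terminal_ids: set[str],
--     memo: dict[str, bool],
-- ) -> bool:
--     """Check if a phase can reach any terminal phase via BFS."""
--     if phase_id in memo:
--         return memo[phase_id]
--
--     visited: set[str] = set()
--     queue: deque[str] = deque([phase_id])
--     while queue:
--         node = queue.popleft()
--         if node in terminal_ids:
--             memo[phase_id] = True
--             return True
--         if node in visited: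
--             continue
--         visited.add(node)
--         for neighbor in adj.get(node, []):
--             if neighbor not in visited:
--                 queue.append(neighbor)
--
--     memo[phase_id] = False
--     return False
-- ===== SOURCE B (Python) =====
-- def _can_reach_terminal(phase_id, adj, terminal_ids, memo):
--     """Reverse search: compute every node that can reach a terminal by walking
--     reversed edges from the terminal set, then test membership of phase_id."""
--     if phase_id in memo:
--         return memo[phase_id]
--
--     rev = {}
--     for src, neighbors in adj.items():
--         for nb in neighbors:
--             rev.setdefault(nb, []).append(src)
--
--     reached = set(terminal_ids)
--     stack = list(terminal_ids)
--     while stack: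
--         node = stack.pop()
--         for pred in rev.get(node, []):
--             if pred not in reached:
--                 reached.add(pred)
--                 stack.append(pred)
--
--     result = phase_id in reached
--     memo[phase_id] = result
--     return result
-- ===== Notes on version B (the rewrite author's own statement) =====
-- stated objective: alternative
-- what changed: Replaces A's forward BFS from phase_id with a reverse search: B builds the reversed adjacency index once, computes by an iterative stack loop the set of all nodes that can reach any terminal, and answers by membership of phase_id; the memo guard and memo write are kept.
import Mathlib
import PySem

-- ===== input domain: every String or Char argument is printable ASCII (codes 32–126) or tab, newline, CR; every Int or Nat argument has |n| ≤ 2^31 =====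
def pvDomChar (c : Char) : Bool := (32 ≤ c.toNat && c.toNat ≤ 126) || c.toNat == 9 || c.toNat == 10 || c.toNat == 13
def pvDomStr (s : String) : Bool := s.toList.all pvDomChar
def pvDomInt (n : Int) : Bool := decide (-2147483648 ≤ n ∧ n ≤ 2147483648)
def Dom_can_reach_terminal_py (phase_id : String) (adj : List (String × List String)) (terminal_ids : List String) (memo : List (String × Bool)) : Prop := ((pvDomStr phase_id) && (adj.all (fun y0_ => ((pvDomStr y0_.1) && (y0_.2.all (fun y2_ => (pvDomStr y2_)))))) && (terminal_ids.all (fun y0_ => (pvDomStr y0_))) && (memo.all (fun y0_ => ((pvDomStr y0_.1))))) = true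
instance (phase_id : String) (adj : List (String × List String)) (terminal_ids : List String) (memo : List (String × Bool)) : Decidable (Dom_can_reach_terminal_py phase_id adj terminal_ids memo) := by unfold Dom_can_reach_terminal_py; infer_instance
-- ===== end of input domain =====

-- B replaces A's forward BFS from phase_id by a reverse search from the terminal set
-- (same return value; in Python both perform the same single memo[phase_id] write).


-- ===== PORT A =====
-- every node name that can ever sit in a queue/stack of either program (the start node
-- and every key/neighbour of adj); used only as the well-foundedness universe
def pvU (phase_id : String) (adj : List (String × List String)) : List String :=
  phase_id :: adj.flatMap (fun kv => kv.1 :: kv.2)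

-- A's `while queue:` loop; `visited` is a Python set consumed only by membership,
-- kept as the list of its distinct elements (cons = visited.add of a fresh node).
-- The `node ∈ U` test is a totality guard only: every enqueued node is in U.
def bfsLoopA (adj : List (String × List String)) (terminal_ids : List String)
    (U : List String) (visited : List String) (queue : List String) : Bool :=
  match queue with
  | [] => false
  | node :: rest =>
    if terminal_ids.contains node then true
    else if visited.contains node then bfsLoopA adj terminal_ids U visited rest
    else if _hU : node ∈ U then
      bfsLoopA adj terminal_ids U (node :: visited)
        (rest ++ (PySem.Dict.getD (PySem.Dict.mk adj) node []).filter
          (fun nb => !((node :: visited).contains nb)))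
    else bfsLoopA adj terminal_ids U visited rest
termination_by ((U.toFinset \ visited.toFinset).card, queue.length)
decreasing_by
  · exact Prod.Lex.right _ (by simp)
  · apply Prod.Lex.left
    apply Finset.card_lt_card
    constructor
    · intro x hx
      simp only [Finset.mem_sdiff, List.mem_toFinset, List.toFinset_cons, Finset.mem_insert] at *
      tauto
    · intro hsub
      have h1 : node ∈ U.toFinset \ visited.toFinset := by
        simp only [Finset.mem_sdiff, List.mem_toFinset]
        refine ⟨_hU, ?_⟩
        intro hmem
        simp_all
      have h2 := hsub h1
      simp at h2
  · exact Prod.Lex.right _ (by simp)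

def can_reach_terminal_py (phase_id : String) (adj : List (String × List String)) (terminal_ids : List String) (memo : List (String × Bool)) : Bool :=
  match (PySem.Dict.mk memo).get? phase_id with
  | some b => b
  | none => bfsLoopA adj terminal_ids (pvU phase_id adj) [] [phase_id]

-- ===== PORT B =====
-- `for src, neighbors in adj.items()`: iterate the pairs, each distinct key once
-- (first occurrence) with its first-match value — on a real Python dict, the pairs
-- themselves; `seen` collects the keys already yielded
def pvEntries : List (String × List String) → List String → List (String × List String)
  | [], _ => []
  | kv :: rest, seen =>
    if seen.contains kv.1 then pvEntries rest seen
    else kv :: pvEntries rest (kv.1 :: seen)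

-- rev.setdefault(nb, []).append(src), over all items
def pvRev (adj : List (String × List String)) : PySem.Dict String (List String) :=
  (pvEntries adj []).foldl
    (fun d kv => kv.2.foldl (fun d nb => d.insert nb (d.getD nb [] ++ [kv.1])) d)
    PySem.Dict.empty

-- B's `while stack:` loop.  The Lean list holds the Python stack reversed (head = top),
-- so `pop()` is head and `append` is cons.  `reached` is a set consumed by membership
-- only, kept as the list of its distinct elements (append = reached.add of a fresh
-- node).  Fuel is a totality device; the supplied fuel is proved sufficient.
def bLoopF (rev : PySem.Dict String (List String)) :
    Nat → List String → List String → List String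
  | 0, reached, _ => reached
  | _ + 1, reached, [] => reached
  | f + 1, reached, node :: rest =>
    let s := (rev.getD node []).foldl
      (fun acc p => if acc.1.contains p then acc else (acc.1 ++ [p], p :: acc.2))
      (reached, ([] : List String))
    bLoopF rev f s.1 (s.2 ++ rest)

def can_reach_terminal_py_alt (phase_id : String) (adj : List (String × List String)) (terminal_ids : List String) (memo : List (String × Bool)) : Bool :=
  match (PySem.Dict.mk memo).get? phase_id with
  | some b => b
  | none =>
    let rev := pvRev adj
    let reached := bLoopF rev (terminal_ids.length + (pvU phase_id adj).length + 1)
        (PySem.Set.ofList terminal_ids) terminal_ids.reverse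
    reached.contains phase_id

-- ===== PRECONDITION & SPEC =====
def Spec_can_reach_terminal_py (phase_id : String) (adj : List (String × List String)) (terminal_ids : List String) (memo : List (String × Bool)) (out : Bool) : Prop := out = can_reach_terminal_py_alt phase_id adj terminal_ids memo
instance (phase_id : String) (adj : List (String × List String)) (terminal_ids : List String) (memo : List (String × Bool)) (out : Bool) : Decidable (Spec_can_reach_terminal_py phase_id adj terminal_ids memo out) := by unfold Spec_can_reach_terminal_py; infer_instance

-- ===== CLAIM (what is proved, stated in full; the proofs are below) =====
def Claim_equal_can_reach_terminal_py : Prop := ∀ (phase_id : String) (adj : List (String × List String)) (terminal_ids : List String) (memo : List (String × Bool)), Dom_can_reach_terminal_py phase_id adj terminal_ids memo → Spec_can_reach_terminal_py phase_id adj terminal_ids memo (can_reach_terminal_py phase_id adj terminal_ids memo)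

-- ===== LEMMAS AND PROOFS =====

-- the common specification: x reaches some terminal node along adj edges
inductive pvReach (adj : List (String × List String)) (terminal_ids : List String) : String → Prop where
  | term (x : String) : terminal_ids.contains x = true → pvReach adj terminal_ids x
  | step (x nb : String) : nb ∈ PySem.Dict.getD (PySem.Dict.mk adj) x [] →
      pvReach adj terminal_ids nb → pvReach adj terminal_ids x

theorem pv_mem_getD (adj : List (String × List String)) (x nb : String) :
    nb ∈ PySem.Dict.getD (PySem.Dict.mk adj) x [] ↔
      ∃ vs, PySem.Dict.get? (PySem.Dict.mk adj) x = some vs ∧ nb ∈ vs := by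
  cases h : PySem.Dict.get? (PySem.Dict.mk adj) x <;>
    simp [PySem.Dict.getD, h]

theorem pv_closed_not_reach (adj : List (String × List String)) (terminal_ids : List String)
    (S : List String)
    (h : ∀ v ∈ S, terminal_ids.contains v = false ∧
        ∀ nb ∈ PySem.Dict.getD (PySem.Dict.mk adj) v [], nb ∈ S) :
    ∀ x, pvReach adj terminal_ids x → x ∉ S := by
  intro x hr
  induction hr with
  | term y hy => intro hyS; have := (h y hyS).1; simp_all
  | step y nb hnb _ ih => intro hyS; exact ih ((h y hyS).2 nb hnb)

theorem pv_adjL_sub_U (phase_id : String) (adj : List (String × List String))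
    (x nb : String) (h : nb ∈ PySem.Dict.getD (PySem.Dict.mk adj) x []) :
    nb ∈ pvU phase_id adj := by
  obtain ⟨vs, hvs, hnb⟩ := (pv_mem_getD adj x nb).1 h
  have hx : (x, vs) ∈ adj := PySem.Dict.mem_items_of_get?_eq_some _ hvs
  simp only [pvU, List.mem_cons, List.mem_flatMap]
  exact Or.inr ⟨(x, vs), hx, by simp [hnb]⟩

theorem pv_key_sub_U (phase_id : String) (adj : List (String × List String))
    (x : String) (vs : List String)
    (h : PySem.Dict.get? (PySem.Dict.mk adj) x = some vs) :
    x ∈ pvU phase_id adj := by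
  have hx : (x, vs) ∈ adj := PySem.Dict.mem_items_of_get?_eq_some _ h
  simp only [pvU, List.mem_cons, List.mem_flatMap]
  exact Or.inr ⟨(x, vs), hx, by simp⟩

-- ---- A correctness ----
theorem pv_A_true (adj : List (String × List String)) (terminal_ids : List String)
    (U : List String) (visited queue : List String)
    (h : bfsLoopA adj terminal_ids U visited queue = true) :
    ∃ q ∈ queue, pvReach adj terminal_ids q := by
  induction visited, queue using bfsLoopA.induct adj terminal_ids U with
  | case1 visited => rw [bfsLoopA] at h; exact absurd h (by simp)
  | case2 visited node rest ht =>
    exact ⟨node, by simp, pvReach.term node ht⟩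
  | case3 visited node rest ht hv ih =>
    rw [bfsLoopA, if_neg ht, if_pos hv] at h
    obtain ⟨q, hq, hr⟩ := ih h
    exact ⟨q, by simp [hq], hr⟩
  | case4 visited node rest ht hv hU ih =>
    rw [bfsLoopA, if_neg ht, if_neg hv, dif_pos hU] at h
    obtain ⟨q, hq, hr⟩ := ih h
    rcases List.mem_append.1 hq with hq | hq
    · exact ⟨q, by simp [hq], hr⟩
    · have : q ∈ PySem.Dict.getD (PySem.Dict.mk adj) node [] := (List.mem_filter.1 hq).1
      exact ⟨node, by simp, pvReach.step node q this hr⟩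
  | case5 visited node rest ht hv hU ih =>
    rw [bfsLoopA, if_neg ht, if_neg hv, dif_neg hU] at h
    obtain ⟨q, hq, hr⟩ := ih h
    exact ⟨q, by simp [hq], hr⟩

theorem pv_A_false (adj : List (String × List String)) (terminal_ids : List String)
    (U : List String)
    (HU : ∀ x nb, nb ∈ PySem.Dict.getD (PySem.Dict.mk adj) x [] → nb ∈ U)
    (visited queue : List String)
    (Hq : ∀ q ∈ queue, q ∈ U)
    (Hv : ∀ v ∈ visited, terminal_ids.contains v = false ∧
        ∀ nb ∈ PySem.Dict.getD (PySem.Dict.mk adj) v [], nb ∈ visited ∨ nb ∈ queue)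
    (h : bfsLoopA adj terminal_ids U visited queue = false) :
    ∀ x, x ∈ queue ∨ x ∈ visited → ¬ pvReach adj terminal_ids x := by
  induction visited, queue using bfsLoopA.induct adj terminal_ids U with
  | case1 visited =>
    intro x hx hr
    have hxS : x ∈ visited := hx.resolve_left (by simp)
    exact pv_closed_not_reach adj terminal_ids visited
      (fun v hv => ⟨(Hv v hv).1,
        fun nb hnb => ((Hv v hv).2 nb hnb).resolve_right (by simp)⟩) x hr hxS
  | case2 visited node rest ht =>
    rw [bfsLoopA, if_pos ht] at h
    exact absurd h (by simp)
  | case3 visited node rest ht hv ih =>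
    rw [bfsLoopA, if_neg ht, if_pos hv] at h
    have hnodev : node ∈ visited := by simpa using hv
    have ih' := ih (fun q hq => Hq q (by simp [hq]))
      (fun v hvv => ⟨(Hv v hvv).1, fun nb hnb => by
        rcases (Hv v hvv).2 nb hnb with h' | h'
        · exact Or.inl h'
        · rcases List.mem_cons.1 h' with h' | h'
          · exact Or.inl (by rw [h']; exact hnodev)
          · exact Or.inr h'⟩) h
    intro x hx
    rcases hx with hx | hx
    · rcases List.mem_cons.1 hx with hx | hx
      · rw [hx]; exact ih' node (Or.inr hnodev)
      · exact ih' x (Or.inl hx)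
    · exact ih' x (Or.inr hx)
  | case4 visited node rest ht hv hU ih =>
    rw [bfsLoopA, if_neg ht, if_neg hv, dif_pos hU] at h
    have ih' := ih
      (fun q hq => by
        rcases List.mem_append.1 hq with hq | hq
        · exact Hq q (by simp [hq])
        · exact HU node q (List.mem_filter.1 hq).1)
      (fun v hvv => by
        rcases List.mem_cons.1 hvv with hveq | hvv
        · rw [hveq]
          refine ⟨by simpa using ht, fun nb hnb => ?_⟩
          by_cases hmem : nb ∈ (node :: visited : List String)
          · exact Or.inl hmem
          · exact Or.inr (List.mem_append.2 (Or.inr (List.mem_filter.2 ⟨hnb, by simpa using hmem⟩)))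
        · refine ⟨(Hv v hvv).1, fun nb hnb => ?_⟩
          rcases (Hv v hvv).2 nb hnb with h' | h'
          · exact Or.inl (by simp [h'])
          · rcases List.mem_cons.1 h' with hne | h'
            · exact Or.inl (by rw [hne]; simp)
            · exact Or.inr (List.mem_append.2 (Or.inl h'))) h
    intro x hx
    rcases hx with hx | hx
    · rcases List.mem_cons.1 hx with hxe | hx
      · rw [hxe]; exact ih' node (Or.inr (by simp))
      · exact ih' x (Or.inl (List.mem_append.2 (Or.inl hx)))
    · exact ih' x (Or.inr (by simp [hx]))
  | case5 visited node rest ht hv hU ih =>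
    exact absurd (Hq node (by simp)) hU

theorem pv_A_iff (phase_id : String) (adj : List (String × List String))
    (terminal_ids : List String) :
    bfsLoopA adj terminal_ids (pvU phase_id adj) [] [phase_id] = true ↔
      pvReach adj terminal_ids phase_id := by
  constructor
  · intro h
    obtain ⟨q, hq, hr⟩ := pv_A_true adj terminal_ids _ [] [phase_id] h
    simp at hq; exact hq ▸ hr
  · intro hr
    by_contra h
    have h' : bfsLoopA adj terminal_ids (pvU phase_id adj) [] [phase_id] = false := by
      simpa using h
    exact pv_A_false adj terminal_ids _
      (fun x nb hnb => pv_adjL_sub_U phase_id adj x nb hnb) [] [phase_id]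
      (by intro q hq; simp at hq; simp [hq, pvU])
      (by simp) h' phase_id (Or.inl (by simp)) hr

-- ---- B correctness ----
theorem pv_entries_mem (l : List (String × List String)) (seen : List String)
    (p : String) (vs : List String) :
    (p, vs) ∈ pvEntries l seen ↔
      p ∉ seen ∧ PySem.Dict.get? (PySem.Dict.mk l) p = some vs := by
  induction l generalizing seen with
  | nil => simp [pvEntries, PySem.Dict.get?]
  | cons kv rest ih =>
    obtain ⟨k, v⟩ := kv
    simp only [pvEntries, PySem.Dict.get?_mk_cons]
    by_cases hs : seen.contains k = true <;> by_cases hk : k = p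
    · subst hk
      rw [if_pos hs, ih]
      constructor <;> (rintro ⟨hns, _⟩; exact absurd (by simpa using hs) hns)
    · rw [if_pos hs, ih, if_neg (by simpa using hk)]
    · subst hk
      rw [if_neg hs, if_pos (by simp)]
      simp only [List.mem_cons, ih]
      constructor
      · rintro (h | ⟨hns, _⟩)
        · simp only [Prod.mk.injEq, true_and] at h
          exact ⟨by simpa using hs, by rw [h]⟩
        · exact absurd (by simp) hns
      · rintro ⟨_, h⟩
        simp only [Option.some.injEq] at h
        exact Or.inl (by rw [h])
    · rw [if_neg hs, if_neg (by simpa using hk)]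
      simp only [List.mem_cons, ih]
      constructor
      · rintro (h | ⟨hns, h'⟩)
        · simp only [Prod.mk.injEq] at h
          exact absurd h.1.symm hk
        · exact ⟨fun hc => hns (by simp [hc]), h'⟩
      · rintro ⟨hns, h⟩
        refine Or.inr ⟨?_, h⟩
        intro hc
        rcases hc with hc | hc
        exacts [hk hc.symm, hns hc]

theorem pv_rev_inner (nbrs : List String) (src : String)
    (d : PySem.Dict String (List String)) (b p : String) :
    p ∈ (nbrs.foldl (fun d nb => d.insert nb (d.getD nb [] ++ [src])) d).getD b [] ↔
      p ∈ d.getD b [] ∨ (p = src ∧ b ∈ nbrs) := by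
  induction nbrs generalizing d with
  | nil => simp
  | cons nb rest ih =>
    rw [List.foldl_cons, ih, PySem.Dict.getD_insert]
    by_cases hb : b = nb
    · subst hb
      simp
      tauto
    · simp only [if_neg hb, List.mem_cons]
      tauto

theorem pv_rev_outer (entries : List (String × List String))
    (d : PySem.Dict String (List String)) (b p : String) :
    p ∈ (entries.foldl
        (fun d kv => kv.2.foldl (fun d nb => d.insert nb (d.getD nb [] ++ [kv.1])) d)
        d).getD b [] ↔
      p ∈ d.getD b [] ∨ ∃ kv ∈ entries, p = kv.1 ∧ b ∈ kv.2 := by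
  induction entries generalizing d with
  | nil => simp
  | cons kv rest ih =>
    rw [List.foldl_cons, ih, pv_rev_inner]
    simp only [List.mem_cons]
    constructor
    · rintro (⟨h | h⟩ | ⟨kv', h', hp, hb⟩)
      · exact Or.inl h
      · exact Or.inr ⟨kv, Or.inl rfl, h⟩
      · exact Or.inr ⟨kv', Or.inr h', hp, hb⟩
    · rintro (h | ⟨kv', h' | h', hp, hb⟩)
      · exact Or.inl (Or.inl h)
      · exact Or.inl (Or.inr ⟨h' ▸ hp, h' ▸ hb⟩)
      · exact Or.inr ⟨kv', h', hp, hb⟩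

theorem pv_rev_mem (adj : List (String × List String)) (b p : String) :
    p ∈ (pvRev adj).getD b [] ↔ b ∈ PySem.Dict.getD (PySem.Dict.mk adj) p [] := by
  rw [pvRev, pv_rev_outer]
  simp only [PySem.Dict.getD_empty, List.not_mem_nil, false_or]
  rw [pv_mem_getD]
  constructor
  · rintro ⟨kv, hkv, rfl, hb⟩
    obtain ⟨_, h⟩ := (pv_entries_mem adj [] kv.1 kv.2).1 (by simpa using hkv)
    exact ⟨kv.2, h, hb⟩
  · rintro ⟨vs, h, hb⟩
    exact ⟨(p, vs), (pv_entries_mem adj [] p vs).2 ⟨by simp, h⟩, rfl, hb⟩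

theorem pv_rev_src_U (phase_id : String) (adj : List (String × List String))
    (b p : String) (h : p ∈ (pvRev adj).getD b []) : p ∈ pvU phase_id adj := by
  have hb := (pv_rev_mem adj b p).1 h
  obtain ⟨vs, hvs, _⟩ := (pv_mem_getD adj p b).1 hb
  exact pv_key_sub_U phase_id adj p vs hvs

-- the inner `for pred in rev.get(node, []):` fold
theorem pv_fold_step (l : List String) (R S : List String) :
    ∃ t, (l.foldl
        (fun acc p => if acc.1.contains p then acc else (acc.1 ++ [p], p :: acc.2))
        (R, S)).1 = R ++ t ∧
      (l.foldl
        (fun acc p => if acc.1.contains p then acc else (acc.1 ++ [p], p :: acc.2))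
        (R, S)).2 = t.reverse ++ S ∧
      t.Nodup ∧ ∀ y ∈ t, y ∉ R ∧ y ∈ l := by
  induction l generalizing R S with
  | nil => exact ⟨[], by simp⟩
  | cons p rest ih =>
    rw [List.foldl_cons]
    by_cases hp : R.contains p
    · rw [if_pos hp]
      obtain ⟨t, h1, h2, h3, h4⟩ := ih R S
      exact ⟨t, h1, h2, h3, fun y hy => ⟨(h4 y hy).1, by simp [(h4 y hy).2]⟩⟩
    · rw [if_neg hp]
      obtain ⟨t, h1, h2, h3, h4⟩ := ih (R ++ [p]) (p :: S)
      refine ⟨p :: t, by simpa using h1, by simpa using h2, ?_, ?_⟩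
      · exact List.nodup_cons.2 ⟨fun hc => by simpa using (h4 p hc).1, h3⟩
      · intro y hy
        rcases List.mem_cons.1 hy with hye | hy
        · subst hye
          exact ⟨by simpa using hp, by simp⟩
        · exact ⟨fun hc => (h4 y hy).1 (by simp [hc]), by simp [(h4 y hy).2]⟩

theorem pv_fold_mem (l : List String) (R S : List String) (x : String)
    (hx : x ∈ R ∨ x ∈ l) :
    x ∈ (l.foldl
        (fun acc p => if acc.1.contains p then acc else (acc.1 ++ [p], p :: acc.2))
        (R, S)).1 := by
  induction l generalizing R S with
  | nil => simpa using hx.resolve_right (by simp)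
  | cons p rest ih =>
    rw [List.foldl_cons]
    by_cases hp : R.contains p
    · rw [if_pos hp]
      rcases hx with hx | hx
      · exact ih R S (Or.inl hx)
      · rcases List.mem_cons.1 hx with rfl | hx
        · exact ih R S (Or.inl (by simpa using hp))
        · exact ih R S (Or.inr hx)
    · rw [if_neg hp]
      rcases hx with hx | hx
      · exact ih _ _ (Or.inl (by simp [hx]))
      · rcases List.mem_cons.1 hx with rfl | hx
        · exact ih _ _ (Or.inl (by simp))
        · exact ih _ _ (Or.inr hx)

theorem pv_card_drop (U reached t : List String) (hnd : t.Nodup)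
    (h : ∀ y ∈ t, y ∈ U ∧ y ∉ reached) :
    (U.toFinset \ (reached ++ t).toFinset).card + t.length ≤
      (U.toFinset \ reached.toFinset).card := by
  have hsub : t.toFinset ⊆ U.toFinset \ reached.toFinset := by
    intro y hy
    simp only [List.mem_toFinset] at hy
    simp only [Finset.mem_sdiff, List.mem_toFinset]
    exact (h y hy)
  have he : U.toFinset \ (reached ++ t).toFinset =
      (U.toFinset \ reached.toFinset) \ t.toFinset := by
    ext y; simp [List.toFinset_append, and_assoc]
  rw [he]
  have := Finset.card_sdiff_add_card_eq_card hsub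
  rw [List.toFinset_card_of_nodup hnd] at this
  omega

theorem pv_B_sound (adj : List (String × List String)) (terminal_ids : List String)
    (rev : PySem.Dict String (List String)) (hrev : rev = pvRev adj)
    (f : Nat) (reached stack : List String)
    (Hs : ∀ x ∈ reached, pvReach adj terminal_ids x)
    (Hk : ∀ x ∈ stack, x ∈ reached) :
    ∀ x ∈ bLoopF rev f reached stack, pvReach adj terminal_ids x := by
  induction f generalizing reached stack with
  | zero => exact Hs
  | succ f ih =>
    cases stack with
    | nil => exact Hs
    | cons node rest =>
      rw [bLoopF]
      obtain ⟨t, h1, h2, _, h4⟩ := pv_fold_step (rev.getD node []) reached []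
      apply ih
      · rw [h1]
        intro x hx
        rcases List.mem_append.1 hx with hx | hx
        · exact Hs x hx
        · have hpred : x ∈ rev.getD node [] := (h4 x hx).2
          have hedge : node ∈ PySem.Dict.getD (PySem.Dict.mk adj) x [] :=
            (pv_rev_mem adj node x).1 (hrev ▸ hpred)
          exact pvReach.step x node hedge (Hs node (Hk node (by simp)))
      · rw [h1, h2]
        intro x hx
        rcases List.mem_append.1 hx with hx | hx
        · simp only [List.append_nil, List.mem_reverse] at hx
          exact List.mem_append.2 (Or.inr hx)
        · exact List.mem_append.2 (Or.inl (Hk x (by simp [hx])))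

theorem pv_B_complete (phase_id : String) (adj : List (String × List String))
    (terminal_ids : List String)
    (rev : PySem.Dict String (List String)) (hrev : rev = pvRev adj)
    (f : Nat) (reached stack : List String)
    (Hfuel : stack.length + ((pvU phase_id adj).toFinset \ reached.toFinset).card < f)
    (Hterm : ∀ x, terminal_ids.contains x = true → x ∈ reached)
    (Hinv : ∀ x ∈ reached, x ∈ stack ∨ ∀ p ∈ rev.getD x [], p ∈ reached) :
    (∀ x, terminal_ids.contains x = true → x ∈ bLoopF rev f reached stack) ∧
      (∀ x ∈ bLoopF rev f reached stack, ∀ p ∈ rev.getD x [],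
        p ∈ bLoopF rev f reached stack) := by
  induction f generalizing reached stack with
  | zero => omega
  | succ f ih =>
    cases stack with
    | nil =>
      refine ⟨fun x hx => by simpa [bLoopF] using Hterm x hx, ?_⟩
      intro x hx p hp
      rw [bLoopF] at hx ⊢
      rcases Hinv x hx with h | h
      · simp at h
      · exact h p hp
    | cons node rest =>
      rw [bLoopF]
      obtain ⟨t, h1, h2, h3, h4⟩ := pv_fold_step (rev.getD node []) reached []
      have htU : ∀ y ∈ t, y ∈ pvU phase_id adj ∧ y ∉ reached := by
        intro y hy
        exact ⟨pv_rev_src_U phase_id adj node y (hrev ▸ (h4 y hy).2), (h4 y hy).1⟩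
      apply ih
      · -- fuel
        have hcard := pv_card_drop (pvU phase_id adj) reached t h3 htU
        rw [h1, h2]
        simp only [List.length_append, List.append_nil, List.length_reverse]
        simp only [List.length_cons] at Hfuel
        omega
      · -- Hterm
        intro x hx
        rw [h1]
        exact List.mem_append.2 (Or.inl (Hterm x hx))
      · -- Hinv
        rw [h1]
        intro x hx
        rcases List.mem_append.1 hx with hx | hx
        · rcases Hinv x hx with hst | hcl
          · rcases List.mem_cons.1 hst with rfl | hst
            · right
              intro p hp
              exact h1 ▸ pv_fold_mem (rev.getD x []) reached [] p (Or.inr hp)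
            · left
              simp [hst]
          · right
            intro p hp
            exact List.mem_append.2 (Or.inl (hcl p hp))
        · exact Or.inl (List.mem_append.2 (Or.inl (by rw [h2]; simp [hx])))

theorem pv_B_iff (phase_id : String) (adj : List (String × List String))
    (terminal_ids : List String) :
    (bLoopF (pvRev adj) (terminal_ids.length + (pvU phase_id adj).length + 1)
        (PySem.Set.ofList terminal_ids) terminal_ids.reverse).contains phase_id = true ↔
      pvReach adj terminal_ids phase_id := by
  have Hfuel : terminal_ids.reverse.length +
      ((pvU phase_id adj).toFinset \ (PySem.Set.ofList terminal_ids).toFinset).card <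
        terminal_ids.length + (pvU phase_id adj).length + 1 := by
    have h1 : ((pvU phase_id adj).toFinset \ (PySem.Set.ofList terminal_ids).toFinset).card ≤
        (pvU phase_id adj).toFinset.card :=
      Finset.card_le_card (Finset.sdiff_subset)
    have h2 := List.toFinset_card_le (pvU phase_id adj)
    simp only [List.length_reverse]
    omega
  have Hterm : ∀ x, terminal_ids.contains x = true → x ∈ PySem.Set.ofList terminal_ids := by
    intro x hx
    exact (PySem.Set.mem_ofList _ _).2 (by simpa using hx)
  have Hk : ∀ x ∈ terminal_ids.reverse, x ∈ PySem.Set.ofList terminal_ids := by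
    intro x hx
    exact (PySem.Set.mem_ofList _ _).2 (by simpa using hx)
  constructor
  · intro h
    have hx : phase_id ∈ bLoopF (pvRev adj)
        (terminal_ids.length + (pvU phase_id adj).length + 1)
        (PySem.Set.ofList terminal_ids) terminal_ids.reverse := by simpa using h
    exact pv_B_sound adj terminal_ids (pvRev adj) rfl
      (terminal_ids.length + (pvU phase_id adj).length + 1)
      (PySem.Set.ofList terminal_ids) terminal_ids.reverse
      (fun x hx => pvReach.term x (by simpa using (PySem.Set.mem_ofList _ _).1 hx))
      Hk phase_id hx
  · intro hr
    obtain ⟨hT, hC⟩ := pv_B_complete phase_id adj terminal_ids (pvRev adj) rfl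
      (terminal_ids.length + (pvU phase_id adj).length + 1)
      (PySem.Set.ofList terminal_ids) terminal_ids.reverse Hfuel Hterm
      (fun x hx => Or.inl (by simpa using (PySem.Set.mem_ofList _ _).1 hx))
    have hAll : ∀ z, pvReach adj terminal_ids z → z ∈ bLoopF (pvRev adj)
        (terminal_ids.length + (pvU phase_id adj).length + 1)
        (PySem.Set.ofList terminal_ids) terminal_ids.reverse := by
      intro z hz
      induction hz with
      | term y hy => exact hT y hy
      | step y nb hnb _ ih =>
        exact hC nb ih y ((pv_rev_mem adj nb y).2 hnb)
    simpa using hAll phase_id hr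

-- ===== VERDICT (by name: the statement is the Claim_ definition above) =====
theorem can_reach_terminal_py_spec : Claim_equal_can_reach_terminal_py := by
  intro phase_id adj terminal_ids memo _
  unfold Spec_can_reach_terminal_py can_reach_terminal_py can_reach_terminal_py_alt
  cases hm : (PySem.Dict.mk memo).get? phase_id with
  | some b => rfl
  | none =>
    simp only
    have hA := pv_A_iff phase_id adj terminal_ids
    have hB := pv_B_iff phase_id adj terminal_ids
    cases h1 : bfsLoopA adj terminal_ids (pvU phase_id adj) [] [phase_id] <;>
      cases h2 : (bLoopF (pvRev adj) (terminal_ids.length + (pvU phase_id adj).length + 1)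
        (PySem.Set.ofList terminal_ids) terminal_ids.reverse).contains phase_id <;>
      simp_all
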